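-- pv_equiv track=rewrite | github.com/12ds95/youtube-cn-dub | pipeline.py | _detect_batch_hallucination
-- ===== SOURCE A (Python) =====
-- from typing import List, Tuple, Optional, Dict, Any
--
-- def _detect_batch_hallucination(translations: List[str], prev_context: List[str] = None) -> set:
--     """检测批内幻觉：相同译文出现 3+ 次（或占 25%+ 批次），或与上下文窗口重复 2+ 次。
--     返回应标记为失败的 translation index 集合。"""
--     from collections import Counter
--     non_empty = [(i, t.strip()) for i, t in enumerate(translations) if t and t.strip()]
--     if len(non_empty) < 3:
--         return set()
--     counts = Counter(t for _, t in non_empty)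
--     threshold = max(3, int(len(translations) * 0.25))
--     hallucinated_texts = {text for text, cnt in counts.items() if cnt >= threshold}
--     # 与 prev_context 重复检测：同一短语在本批出现 2+ 次且存在于上下文中
--     if prev_context:
--         prev_set = set(prev_context)
--         for text, cnt in counts.items():
--             if cnt >= 2 and text in prev_set:
--                 hallucinated_texts.add(text)
--     return {i for i, t in non_empty if t in hallucinated_texts}
-- ===== SOURCE B (Python) =====
-- def _detect_batch_hallucination(translations, prev_context=None):
--     # sort the non-empty stripped entries by text, then scan runs of equal
--     # text with two pointers; a whole run is flagged or skipped at once
--     entries = sorted(((t.strip(), i) for i, t in enumerate(translations) if t.strip()),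
--                      key=lambda e: e[0])
--     if len(entries) < 3:
--         return set()
--     threshold = max(3, int(len(translations) * 0.25))
--     prev = set(prev_context) if prev_context else set()
--     flagged = []
--     j, n = 0, len(entries)
--     while j < n:
--         k = j
--         while k < n and entries[k][0] == entries[j][0]:
--             k += 1
--         if k - j >= threshold or (k - j >= 2 and entries[j][0] in prev):
--             flagged.extend(idx for _, idx in entries[j:k])
--         j = k
--     return set(sorted(flagged))
-- ===== Notes on version B (the rewrite author's own statement) =====
-- stated objective: alternative
-- what changed: Replaces A's hash-counting pipeline (Counter over the non-empty entries, a set of hallucinated texts, then a re-scan of the entries) by a sort-based algorithm: sort the (stripped text, index) pairs by text, then one two-pointer scan over the sorted list flags or skips each run of equal texts wholesale, with no counter, no text set and no re-scan.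
import Mathlib
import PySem

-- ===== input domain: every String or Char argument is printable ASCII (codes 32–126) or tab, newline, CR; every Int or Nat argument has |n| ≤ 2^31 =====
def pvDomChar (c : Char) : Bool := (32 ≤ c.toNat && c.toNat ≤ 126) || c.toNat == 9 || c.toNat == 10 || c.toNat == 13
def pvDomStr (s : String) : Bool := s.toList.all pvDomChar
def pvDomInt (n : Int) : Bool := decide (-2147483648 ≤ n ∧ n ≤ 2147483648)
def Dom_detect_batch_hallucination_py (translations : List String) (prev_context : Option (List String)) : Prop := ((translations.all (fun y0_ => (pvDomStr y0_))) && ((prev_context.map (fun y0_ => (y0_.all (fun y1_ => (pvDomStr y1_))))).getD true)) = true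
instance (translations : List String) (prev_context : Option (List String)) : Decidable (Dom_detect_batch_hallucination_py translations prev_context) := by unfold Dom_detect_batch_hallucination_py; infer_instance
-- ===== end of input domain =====

-- B replaces A's Counter/text-set/re-scan pipeline by sort-by-text plus a two-pointer run scan;
-- same results (alternative algorithm, not claimed faster). Return value only (no mutation).

-- ===== PORT A =====
-- non_empty = [(i, t.strip()) for i, t in enumerate(translations) if t and t.strip()]
def pyA_nonEmpty (translations : List String) : List (Int × String) :=
  (PySem.List.enumerate translations 0).filterMap
    (fun p => if p.2 ≠ "" ∧ PySem.Str.strip p.2 ≠ "" then some (p.1, PySem.Str.strip p.2) else none)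

-- hallucinated_texts: set comp over counts.items(), then the prev_context loop adding repeated context texts
def pyA_hall (counts : PySem.Dict String Int) (threshold : Int)
    (prev_context : Option (List String)) : PySem.Set String :=
  let hall := counts.items.foldl
    (fun s p => if p.2 ≥ threshold then PySem.Set.add s p.1 else s) PySem.Set.empty
  match prev_context with
  | some pc =>
      if pc ≠ [] then
        let prev_set := PySem.Set.ofList pc
        counts.items.foldl
          (fun s p => if p.2 ≥ 2 ∧ PySem.Set.contains prev_set p.1 then PySem.Set.add s p.1 else s) hall
      else hall
  | none => hall

def detect_batch_hallucination_py (translations : List String) (prev_context : Option (List String)) : List Int :=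
  let non_empty := pyA_nonEmpty translations
  if non_empty.length < 3 then []
  else
    let counts := PySem.Dict.counter (non_empty.map Prod.snd)
    -- int(len(translations) * 0.25): 0.25 = 2⁻² and the product is exact in a float, so this is len // 4
    let threshold : Int := max 3 (PySem.Int.floordiv (translations.length : Int) 4)
    let hall := pyA_hall counts threshold prev_context
    PySem.Set.ofList (non_empty.filterMap
      (fun p => if PySem.Set.contains hall p.2 then some p.1 else none))

-- ===== PORT B =====
-- entries = sorted(((t.strip(), i) for i, t in enumerate(translations) if t.strip()), key=lambda e: e[0])
def pyB_entries (translations : List String) : List (String × Int) :=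
  PySem.List.sorted
    ((PySem.List.enumerate translations 0).filterMap
      (fun p => if PySem.Str.strip p.2 ≠ "" then some (PySem.Str.strip p.2, p.1) else none))
    Prod.fst false

-- prev = set(prev_context) if prev_context else set()
def pyB_ctx (prev_context : Option (List String)) : PySem.Set String :=
  match prev_context with
  | some pc => if pc ≠ [] then PySem.Set.ofList pc else PySem.Set.empty
  | none => PySem.Set.empty

-- the two-pointer while loop: k advances over the run entries[j..k) of texts equal to entries[j][0]
-- (takeWhile), the run is extended onto flagged or skipped wholesale, then j = k (dropWhile)
def pyB_scan (thr : Int) (ctx : PySem.Set String) : List (String × Int) → List Int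
  | [] => []
  | e :: rest =>
      let run := e :: rest.takeWhile (fun q => q.1 == e.1)
      let tail := rest.dropWhile (fun q => q.1 == e.1)
      (if (run.length : Int) ≥ thr ∨ ((run.length : Int) ≥ 2 ∧ PySem.Set.contains ctx e.1)
       then run.map Prod.snd else []) ++ pyB_scan thr ctx tail
  termination_by l => l.length
  decreasing_by
    simp only [List.length_cons]
    exact Nat.lt_succ_of_le (List.length_dropWhile_le _ _)

def detect_batch_hallucination_py_alt (translations : List String) (prev_context : Option (List String)) : List Int :=
  let entries := pyB_entries translations
  if entries.length < 3 then []
  else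
    let threshold : Int := max 3 (PySem.Int.floordiv (translations.length : Int) 4)
    let ctx := pyB_ctx prev_context
    let flagged := pyB_scan threshold ctx entries
    PySem.Set.ofList (PySem.List.sorted flagged (fun x => x) false)

-- ===== PRECONDITION & SPEC =====
def Spec_detect_batch_hallucination_py (translations : List String) (prev_context : Option (List String)) (out : List Int) : Prop := out = detect_batch_hallucination_py_alt translations prev_context
instance (translations : List String) (prev_context : Option (List String)) (out : List Int) : Decidable (Spec_detect_batch_hallucination_py translations prev_context out) := by unfold Spec_detect_batch_hallucination_py; infer_instance

-- ===== CLAIM (what is proved, stated in full; the proofs are below) =====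
def Claim_equal_detect_batch_hallucination_py : Prop := ∀ (translations : List String) (prev_context : Option (List String)), Dom_detect_batch_hallucination_py translations prev_context → Spec_detect_batch_hallucination_py translations prev_context (detect_batch_hallucination_py translations prev_context)

-- ===== LEMMAS AND PROOFS =====

-- the shared "non-empty stripped entries" list
def pvFm (p : Int × String) : Option (Int × String) :=
  if PySem.Str.strip p.2 ≠ "" then some (p.1, PySem.Str.strip p.2) else none

def pvL (translations : List String) : List (Int × String) :=
  (PySem.List.enumerate translations 0).filterMap pvFm

-- the flagging predicate, over an arbitrary multiset of texts (given as a list)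
def pvQc (cnts : List String) (thr : Int) (C : List String) (t : String) : Bool :=
  decide ((((cnts.count t : Nat) : Int) ≥ thr) ∨
          ((((cnts.count t : Nat) : Int) ≥ 2) ∧ t ∈ C))

-- A's comprehension condition coincides with the plain strip test (strip "" = "")
theorem pv_nonEmpty_eq (translations : List String) : pyA_nonEmpty translations = pvL translations := by
  unfold pyA_nonEmpty pvL
  apply List.filterMap_congr
  intro p _
  unfold pvFm
  by_cases h : PySem.Str.strip p.2 = ""
  · simp [h]
  · have hp : p.2 ≠ "" := by
      intro he; apply h; rw [he]; decide
    simp [h, hp]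

-- B's pre-sort list is pvL with the pairs swapped
theorem pv_entries_raw (translations : List String) :
    (PySem.List.enumerate translations 0).filterMap
      (fun p => if PySem.Str.strip p.2 ≠ "" then some (PySem.Str.strip p.2, p.1) else none)
    = (pvL translations).map (fun p => (p.2, p.1)) := by
  unfold pvL
  rw [List.map_filterMap]
  apply List.filterMap_congr
  intro p _
  unfold pvFm
  by_cases h : PySem.Str.strip p.2 = "" <;> simp [h]

-- shape: filterMap of if-some is filter-then-map
theorem pv_filterMap_if {α β : Type} (l : List α) (p : α → Bool) (g : α → β) :
    l.filterMap (fun x => if p x then some (g x) else none) = (l.filter p).map g := by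
  induction l with
  | nil => rfl
  | cons a l ih => by_cases h : p a <;> simp [h, ih]

-- membership in an "add the key if its row qualifies" fold
theorem pv_mem_foldl_add {α β : Type} [BEq α] [LawfulBEq α] (l : List β) (key : β → α)
    (P : β → Prop) [DecidablePred P] (s : PySem.Set α) (x : α) :
    (x ∈ l.foldl (fun s b => if P b then PySem.Set.add s (key b) else s) s) ↔
      x ∈ s ∨ ∃ b ∈ l, P b ∧ key b = x := by
  induction l generalizing s with
  | nil => simp
  | cons b l ih =>
    by_cases h : P b
    · simp [h, ih, PySem.Set.mem_add]; tauto
    · simp [h, ih]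

-- membership in A's hallucinated_texts set
theorem pv_mem_hall (L : List (Int × String)) (thr : Int) (prev_context : Option (List String)) (t : String) :
    t ∈ pyA_hall (PySem.Dict.counter (L.map Prod.snd)) thr prev_context ↔
      t ∈ L.map Prod.snd ∧ pvQc (L.map Prod.snd) thr (pyB_ctx prev_context) t = true := by
  have hmem1 : t ∈ (PySem.Dict.counter (L.map Prod.snd)).items.foldl
      (fun s p => if p.2 ≥ thr then PySem.Set.add s p.1 else s) PySem.Set.empty ↔
      t ∈ L.map Prod.snd ∧ ((L.map Prod.snd).count t : Int) ≥ thr := by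
    rw [pv_mem_foldl_add _ Prod.fst (fun p => p.2 ≥ thr)]
    simp [PySem.Dict.items_counter, PySem.Set.mem_ofList, PySem.Set.empty]
  match prev_context with
  | none =>
    simp only [pyA_hall, pyB_ctx]
    rw [hmem1]
    simp [pvQc, PySem.Set.empty]
  | some pc =>
    by_cases hpc : pc = []
    · simp only [pyA_hall, pyB_ctx, hpc]
      rw [if_neg (by simp), if_neg (by simp)]
      rw [hmem1]
      simp [pvQc, PySem.Set.empty]
    · simp only [pyA_hall, pyB_ctx]
      rw [if_pos hpc, if_pos hpc]
      rw [pv_mem_foldl_add _ Prod.fst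
        (fun p => p.2 ≥ 2 ∧ PySem.Set.contains (PySem.Set.ofList pc) p.1), hmem1]
      simp only [PySem.Dict.items_counter, List.mem_map, PySem.Set.mem_ofList, pvQc,
        PySem.Set.contains_iff, decide_eq_true_eq]
      constructor
      · rintro (⟨hk, hge⟩ | ⟨b, ⟨k, hk, rfl⟩, ⟨hge, hc⟩, rfl⟩)
        · exact ⟨hk, Or.inl hge⟩
        · exact ⟨hk, Or.inr ⟨hge, by simpa [PySem.Set.mem_ofList] using hc⟩⟩
      · rintro ⟨hk, hge | ⟨hge, hc⟩⟩
        · exact Or.inl ⟨hk, hge⟩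
        · exact Or.inr ⟨(t, ((L.map Prod.snd).count t : Int)), ⟨t, hk, rfl⟩,
            ⟨hge, by simpa [PySem.Set.contains_iff, PySem.Set.mem_ofList] using hc⟩, rfl⟩

theorem pv_run_count (e : String × Int) (rest : List (String × Int))
    (hs : (e :: rest).Pairwise (fun a b => a.1 ≤ b.1)) :
    ((e :: rest).map Prod.fst).count e.1 = (e :: rest.takeWhile (fun r => r.1 == e.1)).length ∧
      e.1 ∉ (rest.dropWhile (fun r => r.1 == e.1)).map Prod.fst := by
  induction rest generalizing e with
  | nil => simp
  | cons q rest ih =>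
    have hs' := List.pairwise_cons.mp hs
    have hpair : (e :: rest).Pairwise (fun a b => a.1 ≤ b.1) :=
      List.pairwise_cons.mpr ⟨fun b hb => hs'.1 b (List.mem_cons_of_mem _ hb),
        (List.pairwise_cons.mp hs'.2).2⟩
    by_cases hq : q.1 = e.1
    · have hih := ih e hpair
      have h1 : (rest.map Prod.fst).count e.1 = (rest.takeWhile (fun r => r.1 == e.1)).length := by
        have h2 := hih.1
        simp at h2
        omega
      refine ⟨?_, ?_⟩
      · simp [hq, h1]
      · simpa [List.dropWhile_cons, hq] using hih.2
    · have hlt : e.1 < q.1 := lt_of_le_of_ne (hs'.1 q (List.mem_cons_self ..)) (Ne.symm hq)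
      have hnot : e.1 ∉ (q :: rest).map Prod.fst := by
        intro hmem
        rcases List.mem_map.mp hmem with ⟨b, hb, hbe⟩
        rcases List.mem_cons.mp hb with rfl | hb'
        · exact hq hbe
        · have hle : q.1 ≤ b.1 := (List.pairwise_cons.mp hs'.2).1 b hb'
          rw [hbe] at hle
          exact absurd (lt_of_lt_of_le hlt hle) (lt_irrefl _)
      have hc0 : ((q :: rest).map Prod.fst).count e.1 = 0 := List.count_eq_zero.mpr hnot
      refine ⟨?_, ?_⟩
      · simp at hc0 ⊢
        simp [hq, hc0]
      · simpa [List.dropWhile_cons, hq] using hnot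

theorem pv_scan_eq (thr : Int) (ctx : PySem.Set String) :
    ∀ l : List (String × Int), l.Pairwise (fun a b => a.1 ≤ b.1) →
    pyB_scan thr ctx l
      = (l.filter (fun e => pvQc (l.map Prod.fst) thr ctx e.1)).map Prod.snd := by
  intro l
  induction l using pyB_scan.induct with
  | case1 => intro _; simp [pyB_scan]
  | case2 e rest tl ih =>
    intro hs
    have hrc := pv_run_count e rest hs
    have hsplit : e :: rest
        = (e :: rest.takeWhile (fun r => r.1 == e.1)) ++ rest.dropWhile (fun r => r.1 == e.1) := by
      simp [List.takeWhile_append_dropWhile]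
    have hstail : (rest.dropWhile (fun r => r.1 == e.1)).Pairwise (fun a b => a.1 ≤ b.1) :=
      List.Pairwise.sublist ((rest.dropWhile_sublist _).cons e) hs
    have hrunfst : ∀ x ∈ e :: rest.takeWhile (fun r => r.1 == e.1), x.1 = e.1 := by
      intro x hx
      rcases List.mem_cons.mp hx with rfl | hx'
      · rfl
      · exact beq_iff_eq.mp (List.mem_takeWhile_imp (p := fun r : String × Int => r.1 == e.1) hx')
    have hnotail : e.1 ∉ (rest.dropWhile (fun r => r.1 == e.1)).map Prod.fst := hrc.2
    have hcnt_tail : ∀ x ∈ rest.dropWhile (fun r => r.1 == e.1),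
        ((e :: rest).map Prod.fst).count x.1
          = ((rest.dropWhile (fun r => r.1 == e.1)).map Prod.fst).count x.1 := by
      intro x hx
      have hxne : x.1 ≠ e.1 := by
        intro he
        have hm : x.1 ∈ (rest.dropWhile (fun r => r.1 == e.1)).map Prod.fst :=
          List.mem_map_of_mem hx
        rw [he] at hm
        exact hnotail hm
      conv_lhs => rw [hsplit]
      rw [List.map_append, List.count_append]
      have hz : ((e :: rest.takeWhile (fun r => r.1 == e.1)).map Prod.fst).count x.1 = 0 := by
        apply List.count_eq_zero.mpr
        intro hmem
        rcases List.mem_map.mp hmem with ⟨b, hb, hbe⟩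
        exact hxne (hbe ▸ hrunfst b hb)
      omega
    rw [pyB_scan, ih hstail]
    have hcond : ((((e :: rest.takeWhile (fun r => r.1 == e.1)).length : Nat) : Int) ≥ thr ∨
        ((((e :: rest.takeWhile (fun r => r.1 == e.1)).length : Nat) : Int) ≥ 2 ∧
          PySem.Set.contains ctx e.1)) ↔
        pvQc ((e :: rest).map Prod.fst) thr ctx e.1 = true := by
      rw [pvQc, decide_eq_true_eq, hrc.1]
      simp
    conv_rhs => rw [hsplit]
    rw [List.filter_append, List.map_append]
    congr 1
    · have hfr : (e :: rest.takeWhile (fun r => r.1 == e.1)).filter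
          (fun x => pvQc ((e :: rest).map Prod.fst) thr ctx x.1)
          = (e :: rest.takeWhile (fun r => r.1 == e.1)).filter
            (fun _ => pvQc ((e :: rest).map Prod.fst) thr ctx e.1) := by
        apply List.filter_congr
        intro x hx
        rw [hrunfst x hx]
      rw [show ((e :: rest.takeWhile (fun r => r.1 == e.1)) ++
            rest.dropWhile (fun r => r.1 == e.1)) = e :: rest from hsplit.symm]
      rw [hfr]
      by_cases hc : (((e :: rest.takeWhile (fun r => r.1 == e.1)).length : Nat) : Int) ≥ thr ∨
          ((((e :: rest.takeWhile (fun r => r.1 == e.1)).length : Nat) : Int) ≥ 2 ∧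
            PySem.Set.contains ctx e.1)
      · rw [if_pos hc, hcond.mp hc]
        simp
      · rw [if_neg hc]
        have hfalse : pvQc ((e :: rest).map Prod.fst) thr ctx e.1 = false := by
          rcases Bool.eq_false_or_eq_true (pvQc ((e :: rest).map Prod.fst) thr ctx e.1) with h | h
          · exact absurd (hcond.mpr h) hc
          · exact h
        rw [hfalse]
        simp
    · rw [show ((e :: rest.takeWhile (fun r => r.1 == e.1)) ++
            rest.dropWhile (fun r => r.1 == e.1)) = e :: rest from hsplit.symm]
      congr 1
      apply List.filter_congr
      intro x hx
      rw [pvQc, pvQc, hcnt_tail x hx]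

-- indices in pvL are strictly increasing
theorem pv_pairwise_L (translations : List String) :
    (pvL translations).Pairwise (fun p q => p.1 < q.1) := by
  unfold pvL
  rw [List.pairwise_filterMap]
  apply List.Pairwise.imp ?_ (PySem.List.pairwise_lt_enumerate translations 0)
  intro p q h b hb b' hb'
  unfold pvFm at hb hb'
  by_cases hp : PySem.Str.strip p.2 = "" <;> by_cases hq : PySem.Str.strip q.2 = "" <;>
    simp [hp, hq] at hb hb'
  rw [← hb, ← hb']
  simpa using h

theorem detect_batch_hallucination_py_spec' (translations : List String) (prev_context : Option (List String)) :
    detect_batch_hallucination_py translations prev_context =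
      detect_batch_hallucination_py_alt translations prev_context := by
  have hraw := pv_entries_raw translations
  have hperm : (pyB_entries translations).Perm ((pvL translations).map (fun p => (p.2, p.1))) := by
    unfold pyB_entries
    rw [hraw]
    exact PySem.List.sorted_perm _ _ _
  have hlen : (pyB_entries translations).length = (pvL translations).length := by
    rw [hperm.length_eq, List.length_map]
  simp only [detect_batch_hallucination_py, detect_batch_hallucination_py_alt, pv_nonEmpty_eq]
  by_cases h3 : (pvL translations).length < 3
  · rw [if_pos h3, if_pos (hlen ▸ h3)]
  · rw [if_neg h3, if_neg (fun h => h3 (hlen ▸ h))]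
    set thr : Int := max 3 (PySem.Int.floordiv (translations.length : Int) 4) with hthr
    set C := pyB_ctx prev_context with hC
    -- A's side: the filtered index list, in index order
    have hA : (pvL translations).filterMap
        (fun p => if PySem.Set.contains (pyA_hall
          (PySem.Dict.counter ((pvL translations).map Prod.snd)) thr prev_context) p.2
          then some p.1 else none)
        = ((pvL translations).filter (fun p => pvQc ((pvL translations).map Prod.snd) thr C p.2)).map Prod.fst := by
      rw [pv_filterMap_if (pvL translations) _ (fun p => p.1)]
      congr 1
      apply List.filter_congr
      intro p hp
      have hmem : p.2 ∈ (pvL translations).map Prod.snd := List.mem_map_of_mem hp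
      rw [Bool.eq_iff_iff]
      simp only [PySem.Set.contains_iff, pv_mem_hall]
      simp [hmem, hC]
    rw [hA]
    -- B's side: the scan is a filter over the sorted entries
    have hsorted : (pyB_entries translations).Pairwise (fun a b => a.1 ≤ b.1) :=
      PySem.List.sorted_pairwise _ _
    rw [pv_scan_eq thr C _ hsorted]
    -- counts over the sorted entries' texts = counts over pvL's texts
    have hcnts : ∀ t, ((pyB_entries translations).map Prod.fst).count t
        = ((pvL translations).map Prod.snd).count t := by
      intro t
      have h1 : ((pyB_entries translations).map Prod.fst).Perm
          (((pvL translations).map (fun p => (p.2, p.1))).map Prod.fst) := hperm.map _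
      rw [h1.count_eq, List.map_map]
      rfl
    have hfeq : (pyB_entries translations).filter
        (fun e => pvQc ((pyB_entries translations).map Prod.fst) thr C e.1)
        = (pyB_entries translations).filter (fun e => pvQc ((pvL translations).map Prod.snd) thr C e.1) := by
      apply List.filter_congr
      intro x _
      rw [pvQc, pvQc, hcnts x.1]
    rw [hfeq]
    -- the flagged indices are a permutation of A's index list
    have hpermflag : (((pyB_entries translations).filter
        (fun e => pvQc ((pvL translations).map Prod.snd) thr C e.1)).map Prod.snd).Perm
        (((pvL translations).filter (fun p => pvQc ((pvL translations).map Prod.snd) thr C p.2)).map Prod.fst) := by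
      have h1 := (hperm.filter (fun e => pvQc ((pvL translations).map Prod.snd) thr C e.1)).map Prod.snd
      apply h1.trans
      rw [List.filter_map, List.map_map]
      apply List.Perm.of_eq
      rfl
    -- A's index list is strictly increasing, so sorting the flagged indices returns exactly it
    have hpair : (((pvL translations).filter (fun p => pvQc ((pvL translations).map Prod.snd) thr C p.2)).map Prod.fst).Pairwise
        (fun a b => a < b) := by
      rw [List.pairwise_map]
      exact (pv_pairwise_L translations).filter _
    rw [PySem.List.sorted_eq_of_perm_of_pairwise_lt _ _ _ hpermflag.symm hpair]

-- ===== VERDICT (by name: the statement is the Claim_ definition above) =====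
theorem detect_batch_hallucination_py_spec : Claim_equal_detect_batch_hallucination_py := by
  intro translations prev_context _
  exact detect_batch_hallucination_py_spec' translations prev_context
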